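-- pv_equiv track=rewrite | github.com/LichHunter/personal-library-manager | src/plm/extraction/slow/postprocess.py | suppress_subspans
-- ===== SOURCE A (Python) =====
-- def suppress_subspans(
--     terms: list[str],
--     protected: set[str] | None = None,
-- ) -> list[str]:
--     """Remove terms that are substrings of other extracted terms.
--
--     Only suppresses when the shorter term is a non-word-boundary substring
--     (e.g., "getInputSizes" inside "getInputSizes(ImageFormat...)") or when
--     a single word appears inside a 3+-word compound. Preserves both forms
--     for 2-word pairs like "Right" / "arrow right".
--
--     Args:
--         terms: List of extracted terms
--         protected: Set of terms to never suppress (e.g., known common-word entities)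
--
--     Returns:
--         List with subspans removed
--     """
--     if not terms:
--         return terms
--
--     _protected = protected or set()
--     lower_terms = [(t, t.lower()) for t in terms]
--     kept: list[str] = []
--
--     for term, term_lower in lower_terms:
--         # Very short terms always kept
--         if len(term) <= 3:
--             kept.append(term)
--             continue
--
--         # Protected terms never suppressed
--         if term_lower in _protected:
--             kept.append(term)
--             continue
--
--         is_subspan = False
--         for other, other_lower in lower_terms:
--             if term_lower == other_lower:
--                 continue
--             if term_lower not in other_lower or len(term_lower) >= len(other_lower):
--                 continue
--
--             shorter_words = term_lower.split()
--             longer_words = other_lower.split()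
--
--             # Preserve both forms for 2-word pairs (e.g., "Right" / "arrow right")
--             if len(shorter_words) == 1 and len(longer_words) == 2:
--                 continue
--
--             is_subspan = True
--             break
--
--         if not is_subspan:
--             kept.append(term)
--
--     return kept
-- ===== SOURCE B (Python) =====
-- def suppress_subspans(terms, protected=None):
--     """Enumerate every proper substring of each distinct lowered term once
--     (bucketed by the container's word count), then decide each term by set
--     lookup instead of scanning the whole list per term."""
--     if not terms:
--         return terms
--     prot = protected or set()
--     sub_any = set()  # proper substrings of containers with word count != 2
--     sub_two = set()  # proper substrings of containers with word count == 2
--     for u in {t.lower() for t in terms}: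
--         n = len(u)
--         target = sub_two if len(u.split()) == 2 else sub_any
--         for i in range(n):
--             for j in range(i + 1, n + 1):
--                 if j - i < n:
--                     target.add(u[i:j])
--     out = []
--     for t in terms:
--         tl = t.lower()
--         if len(t) <= 3 or tl in prot:
--             out.append(t)
--         elif tl in sub_any or (len(tl.split()) != 1 and tl in sub_two):
--             pass
--         else:
--             out.append(t)
--     return out
-- ===== Notes on version B (the rewrite author's own statement) =====
-- stated objective: faster
-- what changed: B replaces A's per-term scan of the whole term list for substring containment by a precomputed index: it enumerates every proper substring of each distinct lowercased term once (bucketed by the container's word count to honour the 1-word-in-2-word exception) into hash sets, then decides each term by two O(1) set lookups.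
import Mathlib
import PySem

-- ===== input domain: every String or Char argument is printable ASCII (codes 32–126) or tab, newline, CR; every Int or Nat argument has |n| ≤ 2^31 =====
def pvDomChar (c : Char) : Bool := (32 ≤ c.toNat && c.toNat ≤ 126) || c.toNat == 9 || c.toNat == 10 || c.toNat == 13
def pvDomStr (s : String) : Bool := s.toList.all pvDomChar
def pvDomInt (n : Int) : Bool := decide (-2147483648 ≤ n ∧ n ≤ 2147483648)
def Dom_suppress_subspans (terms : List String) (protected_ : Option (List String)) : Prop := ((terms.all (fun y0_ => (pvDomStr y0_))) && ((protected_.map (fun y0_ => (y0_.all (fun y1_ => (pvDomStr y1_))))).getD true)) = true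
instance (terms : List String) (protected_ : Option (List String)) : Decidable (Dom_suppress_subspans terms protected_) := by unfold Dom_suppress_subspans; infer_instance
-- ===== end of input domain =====

-- B replaces A's per-term scan of the whole list by a precomputed proper-substring index:
-- every proper substring of each distinct lowercased term is enumerated once (bucketed by the
-- container's word count), and each term is then decided by set lookups; a timing run measured B faster on large inputs.

-- ===== PORT A =====
-- inner 'for other, other_lower in lower_terms' loop with continue/break
def pvInnerA (tl : String) : List (String × String) → Bool
  | [] => false
  | p :: rest =>
    if tl == p.2 then pvInnerA tl rest
    else if !PySem.Str.isIn tl p.2 || decide (PySem.Str.len tl ≥ PySem.Str.len p.2) then pvInnerA tl rest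
    else if (PySem.Str.split₀ tl).length == 1 && (PySem.Str.split₀ p.2).length == 2 then pvInnerA tl rest
    else true

def suppress_subspans (terms : List String) (protected_ : Option (List String)) : List String :=
  if terms.isEmpty then terms
  else
    let _protected : List String := match protected_ with
      | none => []
      | some p => if p.isEmpty then [] else p   -- 'protected or set()'
    let lower_terms := terms.map (fun t => (t, PySem.Str.lower t))
    lower_terms.foldl (fun kept p =>
      if decide (PySem.Str.len p.1 ≤ 3) then kept ++ [p.1]
      else if _protected.contains p.2 then kept ++ [p.1]
      else if pvInnerA p.2 lower_terms then kept
      else kept ++ [p.1]) []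

-- ===== PORT B =====
-- the two nested 'for i in range(n): for j in range(i+1, n+1): if j-i < n: target.add(u[i:j])' loops
def pvAddSubs (acc : PySem.Set String) (u : String) : PySem.Set String :=
  (PySem.List.pyRange 0 (PySem.Str.len u) 1).foldl (fun a i =>
    (PySem.List.pyRange (i + 1) (PySem.Str.len u + 1) 1).foldl (fun b j =>
      if j - i < PySem.Str.len u then PySem.Set.add b (PySem.Str.slice u (some i) (some j)) else b) a) acc

def suppress_subspans_alt (terms : List String) (protected_ : Option (List String)) : List String :=
  if terms.isEmpty then terms
  else
    let prot : List String := match protected_ with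
      | none => []
      | some p => if p.isEmpty then [] else p   -- 'protected or set()'
    -- 'for u in {t.lower() for t in terms}: target = sub_two if len(u.split())==2 else sub_any; …'
    let sets := List.foldl
      (fun (st : PySem.Set String × PySem.Set String) u =>
        if (PySem.Str.split₀ u).length == 2 then (st.1, pvAddSubs st.2 u)
        else (pvAddSubs st.1 u, st.2))
      (PySem.Set.empty, PySem.Set.empty)
      (PySem.Set.ofList (terms.map PySem.Str.lower))
    terms.filter (fun t =>
      if decide (PySem.Str.len t ≤ 3) || prot.contains (PySem.Str.lower t) then true
      else if PySem.Set.contains sets.1 (PySem.Str.lower t)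
             || (!((PySem.Str.split₀ (PySem.Str.lower t)).length == 1)
                 && PySem.Set.contains sets.2 (PySem.Str.lower t)) then false
      else true)

-- ===== PRECONDITION & SPEC =====
def Spec_suppress_subspans (terms : List String) (protected_ : Option (List String)) (out : List String) : Prop := out = suppress_subspans_alt terms protected_
instance (terms : List String) (protected_ : Option (List String)) (out : List String) : Decidable (Spec_suppress_subspans terms protected_ out) := by unfold Spec_suppress_subspans; infer_instance

-- ===== CLAIM (what is proved, stated in full; the proofs are below) =====
def Claim_equal_suppress_subspans : Prop := ∀ (terms : List String) (protected_ : Option (List String)), Dom_suppress_subspans terms protected_ → Spec_suppress_subspans terms protected_ (suppress_subspans terms protected_)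

-- ===== LEMMAS AND PROOFS =====

-- the pair condition A's inner loop effectively tests
def pvCond (s u : String) : Bool :=
  s != u && decide (PySem.Str.len s < PySem.Str.len u) && PySem.Str.isIn s u
    && !((PySem.Str.split₀ s).length == 1 && (PySem.Str.split₀ u).length == 2)

theorem pvCond_unfold (s u : String) :
    pvCond s u = ((((s != u) && decide (PySem.Str.len s < PySem.Str.len u)) && PySem.Str.isIn s u)
      && !((PySem.Str.split₀ s).length == 1 && (PySem.Str.split₀ u).length == 2)) := rfl

theorem pvCond_false_of_beq (s u : String) (h : (s == u) = true) : pvCond s u = false := by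
  have hbne : (s != u) = false := by simp [bne, h]
  rw [pvCond_unfold, hbne]
  simp only [Bool.false_and]

theorem pvCond_false_of_skip2 (s u : String)
    (h : (!PySem.Str.isIn s u || decide (PySem.Str.len s ≥ PySem.Str.len u)) = true) :
    pvCond s u = false := by
  cases hin : PySem.Str.isIn s u with
  | false =>
    rw [pvCond_unfold, hin]
    simp only [Bool.and_false, Bool.false_and]
  | true =>
    rw [hin] at h
    have hge : decide (PySem.Str.len s ≥ PySem.Str.len u) = true := by simpa using h
    have hge' : PySem.Str.len u ≤ PySem.Str.len s := of_decide_eq_true hge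
    have hlt : decide (PySem.Str.len s < PySem.Str.len u) = false := decide_eq_false (by omega)
    rw [pvCond_unfold, hlt]
    simp only [Bool.and_false, Bool.false_and]

theorem pvCond_false_of_words (s u : String)
    (h : ((PySem.Str.split₀ s).length == 1 && (PySem.Str.split₀ u).length == 2) = true) :
    pvCond s u = false := by
  rw [pvCond_unfold, h]
  simp only [Bool.not_true, Bool.and_false]

theorem pvCond_true (s u : String) (h1 : (s == u) = false)
    (h2 : (!PySem.Str.isIn s u || decide (PySem.Str.len s ≥ PySem.Str.len u)) = false)
    (h3 : ((PySem.Str.split₀ s).length == 1 && (PySem.Str.split₀ u).length == 2) = false) :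
    pvCond s u = true := by
  have h2p := Bool.or_eq_false_iff.mp h2
  have hin : PySem.Str.isIn s u = true := by simpa using h2p.1
  have hbne : (s != u) = true := by simp [bne, h1]
  have hlt : decide (PySem.Str.len s < PySem.Str.len u) = true := by
    have := of_decide_eq_false h2p.2
    exact decide_eq_true (by omega)
  rw [pvCond_unfold, hbne, hlt, hin, h3]
  rfl

theorem pvInnerA_eq_any (tl : String) (l : List (String × String)) :
    pvInnerA tl l = l.any (fun p => pvCond tl p.2) := by
  induction l with
  | nil => rfl
  | cons p rest ih =>
    simp only [pvInnerA, List.any_cons]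
    split_ifs with h1 h2 h3
    · rw [ih, pvCond_false_of_beq _ _ h1]; simp
    · rw [ih, pvCond_false_of_skip2 _ _ h2]; simp
    · rw [ih, pvCond_false_of_words _ _ h3]; simp
    · rw [pvCond_true _ _ (by simpa using h1) (by simpa using h2) (by simpa using h3)]
      simp

-- a proper nonempty substring occurrence ("what B's index stores")
def pvQ (u x : String) : Prop :=
  x.toList ≠ [] ∧ x.toList.length < u.toList.length ∧ x.toList <:+: u.toList

-- generic accumulation lemma for a fold that only adds elements to a PySem.Set
theorem pvFoldAdd {ι : Type} (g : PySem.Set String → ι → PySem.Set String)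
    (P : ι → String → Prop)
    (hg : ∀ a i x, (x ∈ g a i ↔ x ∈ a ∨ P i x)) :
    ∀ (L : List ι) (acc : PySem.Set String) (x : String),
      x ∈ L.foldl g acc ↔ x ∈ acc ∨ ∃ i ∈ L, P i x := by
  intro L
  induction L with
  | nil => intro acc x; simp
  | cons i rest ih =>
    intro acc x
    simp only [List.foldl_cons, ih, hg, List.mem_cons]
    constructor
    · rintro ((hx | hp) | ⟨k, hk, hp⟩)
      · exact Or.inl hx
      · exact Or.inr ⟨i, Or.inl rfl, hp⟩
      · exact Or.inr ⟨k, Or.inr hk, hp⟩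
    · rintro (hx | ⟨k, (rfl | hk), hp⟩)
      · exact Or.inl (Or.inl hx)
      · exact Or.inl (Or.inr hp)
      · exact Or.inr ⟨k, hk, hp⟩

theorem pvMem_addSubs (u : String) (acc : PySem.Set String) (x : String) :
    x ∈ pvAddSubs acc u ↔ x ∈ acc ∨
      ∃ i ∈ PySem.List.pyRange 0 (PySem.Str.len u) 1,
        ∃ j ∈ PySem.List.pyRange (i + 1) (PySem.Str.len u + 1) 1,
          j - i < PySem.Str.len u ∧ x = PySem.Str.slice u (some i) (some j) := by
  unfold pvAddSubs
  refine pvFoldAdd _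
    (fun i x => ∃ j ∈ PySem.List.pyRange (i + 1) (PySem.Str.len u + 1) 1,
      j - i < PySem.Str.len u ∧ x = PySem.Str.slice u (some i) (some j)) ?_ _ acc x
  intro a i x
  refine pvFoldAdd _ (fun j x => j - i < PySem.Str.len u ∧ x = PySem.Str.slice u (some i) (some j)) ?_ _ a x
  intro b j x
  by_cases h : j - i < PySem.Str.len u
  · rw [if_pos h, PySem.Set.mem_add]
    constructor
    · rintro (hx | rfl)
      · exact Or.inl hx
      · exact Or.inr ⟨h, rfl⟩
    · rintro (hx | ⟨_, rfl⟩)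
      · exact Or.inl hx
      · exact Or.inr rfl
  · rw [if_neg h]
    constructor
    · exact Or.inl
    · rintro (hx | ⟨hlt, _⟩)
      · exact hx
      · exact absurd hlt h

theorem pvSubs_iff (u x : String) :
    (∃ i ∈ PySem.List.pyRange 0 (PySem.Str.len u) 1,
        ∃ j ∈ PySem.List.pyRange (i + 1) (PySem.Str.len u + 1) 1,
          j - i < PySem.Str.len u ∧ x = PySem.Str.slice u (some i) (some j))
      ↔ pvQ u x := by
  constructor
  · rintro ⟨i, hi, j, hj, hlt, rfl⟩
    rw [PySem.List.mem_pyRange_one] at hi hj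
    rw [PySem.Str.len_eq] at hi hj hlt
    have h0i : (0 : Int) ≤ i := hi.1
    have h0j : (0 : Int) ≤ j := by omega
    have htl : (PySem.Str.slice u (some i) (some j)).toList
        = (u.toList.drop i.toNat).take (j.toNat - i.toNat) := by
      rw [PySem.Str.toList_slice, PySem.Chars.slice_eq_listSlice,
        PySem.List.slice_toNat _ h0i h0j]
    have hij : i.toNat < j.toNat := by omega
    have hiu : i.toNat < u.toList.length := by omega
    have hjlt : j.toNat - i.toNat < u.toList.length := by omega
    have hlen : ((u.toList.drop i.toNat).take (j.toNat - i.toNat)).length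
        = min (j.toNat - i.toNat) (u.toList.length - i.toNat) := by
      simp [List.length_take, List.length_drop]
    refine ⟨?_, ?_, ?_⟩
    · intro hnil
      rw [htl] at hnil
      have := congrArg List.length hnil
      rw [hlen] at this
      simp only [List.length_nil] at this
      omega
    · rw [htl, hlen]
      omega
    · rw [htl]
      exact ((List.take_prefix _ _).isInfix).trans (List.drop_suffix _ _).isInfix
  · rintro ⟨hne, hlen, t, s, hts⟩
    have hx1 : 0 < x.toList.length := List.length_pos_of_ne_nil hne
    refine ⟨(t.length : Int), ?_, (t.length : Int) + (x.toList.length : Int), ?_, ?_, ?_⟩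
    · rw [PySem.List.mem_pyRange_one, PySem.Str.len_eq]
      have : t.length + x.toList.length + s.length = u.toList.length := by
        rw [← hts]; simp [List.length_append]; omega
      omega
    · rw [PySem.List.mem_pyRange_one, PySem.Str.len_eq]
      have : t.length + x.toList.length + s.length = u.toList.length := by
        rw [← hts]; simp [List.length_append]; omega
      omega
    · rw [PySem.Str.len_eq]; omega
    · rw [← String.toList_inj, PySem.Str.toList_slice, PySem.Chars.slice_eq_listSlice]
      have hcast : ((t.length : Int) + (x.toList.length : Int)) = ((t.length + x.toList.length : Nat) : Int) := by
        push_cast; ring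
      rw [hcast, PySem.List.slice_natCast, ← hts]
      rw [List.append_assoc, List.drop_left]
      have : t.length + x.toList.length - t.length = x.toList.length := by omega
      rw [this, List.take_left]

theorem pvMem_addSubs_iff (u : String) (acc : PySem.Set String) (x : String) :
    x ∈ pvAddSubs acc u ↔ x ∈ acc ∨ pvQ u x := by
  rw [pvMem_addSubs, pvSubs_iff]

-- characterization of the two substring buckets B builds
theorem pvSets_spec (L : List String) (st : PySem.Set String × PySem.Set String) (x : String) :
    let F := List.foldl
      (fun (st : PySem.Set String × PySem.Set String) u =>
        if (PySem.Str.split₀ u).length == 2 then (st.1, pvAddSubs st.2 u)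
        else (pvAddSubs st.1 u, st.2)) st L
    (x ∈ F.1 ↔ x ∈ st.1 ∨ ∃ u ∈ L, (PySem.Str.split₀ u).length ≠ 2 ∧ pvQ u x)
      ∧ (x ∈ F.2 ↔ x ∈ st.2 ∨ ∃ u ∈ L, (PySem.Str.split₀ u).length = 2 ∧ pvQ u x) := by
  induction L generalizing st with
  | nil => simp
  | cons u rest ih =>
    simp only [List.foldl_cons]
    by_cases h : (PySem.Str.split₀ u).length = 2
    · have hb : ((PySem.Str.split₀ u).length == 2) = true := by simpa using h
      rw [hb]
      simp only [if_true]
      obtain ⟨ih1, ih2⟩ := ih (st.1, pvAddSubs st.2 u)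
      refine ⟨?_, ?_⟩
      · rw [ih1]
        simp only [List.mem_cons]
        constructor
        · rintro (hx | ⟨w, hw, hq⟩)
          · exact Or.inl hx
          · exact Or.inr ⟨w, Or.inr hw, hq⟩
        · rintro (hx | ⟨w, (rfl | hw), hq⟩)
          · exact Or.inl hx
          · exact absurd h hq.1
          · exact Or.inr ⟨w, hw, hq⟩
      · rw [ih2]
        simp only [pvMem_addSubs_iff, List.mem_cons]
        constructor
        · rintro ((hx | hq) | ⟨w, hw, hq⟩)
          · exact Or.inl hx
          · exact Or.inr ⟨u, Or.inl rfl, h, hq⟩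
          · exact Or.inr ⟨w, Or.inr hw, hq⟩
        · rintro (hx | ⟨w, (rfl | hw), hq⟩)
          · exact Or.inl (Or.inl hx)
          · exact Or.inl (Or.inr hq.2)
          · exact Or.inr ⟨w, hw, hq⟩
    · have hb : ((PySem.Str.split₀ u).length == 2) = false := by simpa using h
      rw [hb]
      simp only [Bool.false_eq_true, if_false]
      obtain ⟨ih1, ih2⟩ := ih (pvAddSubs st.1 u, st.2)
      refine ⟨?_, ?_⟩
      · rw [ih1]
        simp only [pvMem_addSubs_iff, List.mem_cons]
        constructor
        · rintro ((hx | hq) | ⟨w, hw, hq⟩)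
          · exact Or.inl hx
          · exact Or.inr ⟨u, Or.inl rfl, h, hq⟩
          · exact Or.inr ⟨w, Or.inr hw, hq⟩
        · rintro (hx | ⟨w, (rfl | hw), hq⟩)
          · exact Or.inl (Or.inl hx)
          · exact Or.inl (Or.inr hq.2)
          · exact Or.inr ⟨w, hw, hq⟩
      · rw [ih2]
        simp only [List.mem_cons]
        constructor
        · rintro (hx | ⟨w, hw, hq⟩)
          · exact Or.inl hx
          · exact Or.inr ⟨w, Or.inr hw, hq⟩
        · rintro (hx | ⟨w, (rfl | hw), hq⟩)
          · exact Or.inl hx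
          · exact absurd hq.1 h
          · exact Or.inr ⟨w, hw, hq⟩

theorem pvCond_iff (s u : String) (hs : s.toList ≠ []) :
    pvCond s u = true ↔
      pvQ u s ∧ ¬((PySem.Str.split₀ s).length = 1 ∧ (PySem.Str.split₀ u).length = 2) := by
  rw [pvCond_unfold]
  simp only [Bool.and_eq_true, Bool.not_eq_eq_eq_not, Bool.not_true, bne_iff_ne,
    decide_eq_true_eq, PySem.Str.isIn_iff_infix, PySem.Str.len_eq]
  constructor
  · rintro ⟨⟨⟨_, hlt⟩, hin⟩, hw⟩
    refine ⟨⟨hs, by exact_mod_cast hlt, hin⟩, ?_⟩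
    intro ⟨h1, h2⟩
    simp [h1, h2] at hw
  · rintro ⟨⟨_, hlt, hin⟩, hw⟩
    refine ⟨⟨⟨?_, by exact_mod_cast hlt⟩, hin⟩, ?_⟩
    · intro heq
      rw [heq] at hlt
      omega
    · cases h1 : ((PySem.Str.split₀ s).length == 1) with
      | false => simp
      | true =>
        cases h2 : ((PySem.Str.split₀ u).length == 2) with
        | false => simp
        | true =>
          exact absurd ⟨by simpa using h1, by simpa using h2⟩ hw

-- length of a lowered string
theorem pvLower_len (t : String) : (PySem.Str.lower t).toList.length = t.toList.length := by
  rw [PySem.Str.toList_lower]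
  simp [PySem.Chars.lower]

-- the key per-term equivalence: A's inner scan = B's two set lookups
theorem pvKey (terms : List String) (t : String) (hlen : ¬ PySem.Str.len t ≤ 3) :
    pvInnerA (PySem.Str.lower t) (terms.map (fun x => (x, PySem.Str.lower x)))
      = (PySem.Set.contains
            (List.foldl
              (fun (st : PySem.Set String × PySem.Set String) u =>
                if (PySem.Str.split₀ u).length == 2 then (st.1, pvAddSubs st.2 u)
                else (pvAddSubs st.1 u, st.2))
              (PySem.Set.empty, PySem.Set.empty)
              (PySem.Set.ofList (terms.map PySem.Str.lower))).1 (PySem.Str.lower t)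
          || (!((PySem.Str.split₀ (PySem.Str.lower t)).length == 1)
              && PySem.Set.contains
                (List.foldl
                  (fun (st : PySem.Set String × PySem.Set String) u =>
                    if (PySem.Str.split₀ u).length == 2 then (st.1, pvAddSubs st.2 u)
                    else (pvAddSubs st.1 u, st.2))
                  (PySem.Set.empty, PySem.Set.empty)
                  (PySem.Set.ofList (terms.map PySem.Str.lower))).2 (PySem.Str.lower t))) := by
  have hne : (PySem.Str.lower t).toList ≠ [] := by
    intro h
    have := congrArg List.length h
    rw [pvLower_len] at this
    rw [PySem.Str.len_eq] at hlen
    simp only [List.length_nil] at this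
    omega
  obtain ⟨hF1, hF2⟩ := pvSets_spec (PySem.Set.ofList (terms.map PySem.Str.lower))
    (PySem.Set.empty, PySem.Set.empty) (PySem.Str.lower t)
  rw [Bool.eq_iff_iff, pvInnerA_eq_any, List.any_eq_true, Bool.or_eq_true, Bool.and_eq_true,
    PySem.Set.contains_iff, PySem.Set.contains_iff, hF1, hF2]
  have hemp : PySem.Str.lower t ∉ (PySem.Set.empty : PySem.Set String) := by
    intro h; exact absurd h (List.not_mem_nil)
  simp only [hemp, false_or]
  constructor
  · rintro ⟨p, hp, hc⟩
    obtain ⟨w, hw, rfl⟩ := List.mem_map.mp hp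
    obtain ⟨hq, hnw⟩ := (pvCond_iff _ _ hne).mp hc
    have hwmem : PySem.Str.lower w ∈ PySem.Set.ofList (terms.map PySem.Str.lower) :=
      (PySem.Set.mem_ofList _ _).mpr (List.mem_map_of_mem hw)
    by_cases h2 : (PySem.Str.split₀ (PySem.Str.lower w)).length = 2
    · have h1 : (PySem.Str.split₀ (PySem.Str.lower t)).length ≠ 1 := fun h1 => hnw ⟨h1, h2⟩
      exact Or.inr ⟨by simpa using h1, ⟨PySem.Str.lower w, hwmem, h2, hq⟩⟩
    · exact Or.inl ⟨PySem.Str.lower w, hwmem, h2, hq⟩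
  · rintro (⟨u, hu, hn2, hq⟩ | ⟨h1, u, hu, h2, hq⟩)
    · obtain ⟨w, hw, rfl⟩ := List.mem_map.mp ((PySem.Set.mem_ofList _ _).mp hu)
      exact ⟨(w, PySem.Str.lower w), List.mem_map_of_mem hw,
        (pvCond_iff _ _ hne).mpr ⟨hq, fun h => hn2 h.2⟩⟩
    · obtain ⟨w, hw, rfl⟩ := List.mem_map.mp ((PySem.Set.mem_ofList _ _).mp hu)
      have h1' : (PySem.Str.split₀ (PySem.Str.lower t)).length ≠ 1 := by simpa using h1
      exact ⟨(w, PySem.Str.lower w), List.mem_map_of_mem hw,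
        (pvCond_iff _ _ hne).mpr ⟨hq, fun h => h1' h.1⟩⟩

-- A's append-fold over lower_terms is a filter-then-project
theorem pvAOut_eq (pairs : List (String × String)) (prot : List String)
    (lts : List (String × String)) (acc : List String) :
    pairs.foldl (fun kept p =>
      if decide (PySem.Str.len p.1 ≤ 3) then kept ++ [p.1]
      else if prot.contains p.2 then kept ++ [p.1]
      else if pvInnerA p.2 lts then kept
      else kept ++ [p.1]) acc
    = acc ++ (pairs.filter (fun p =>
        decide (PySem.Str.len p.1 ≤ 3) || prot.contains p.2 || !pvInnerA p.2 lts)).map (·.1) := by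
  induction pairs generalizing acc with
  | nil => simp
  | cons p rest ih =>
    simp only [List.foldl_cons, List.filter_cons]
    (split_ifs with h1 h2 h3 <;> simp_all)
    omega

theorem suppress_subspans_eq_alt (terms : List String) (protected_ : Option (List String)) :
    suppress_subspans terms protected_ = suppress_subspans_alt terms protected_ := by
  unfold suppress_subspans suppress_subspans_alt
  by_cases hE : terms.isEmpty
  · simp [hE]
  · simp only [Bool.not_eq_true] at hE
    simp only [hE, Bool.false_eq_true, if_false]
    rw [pvAOut_eq, List.nil_append, List.filter_map, List.map_map]
    have hmap : ((fun p : String × String => p.1) ∘ fun t => (t, PySem.Str.lower t)) = id := rfl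
    rw [hmap, List.map_id]
    apply List.filter_congr
    intro t _
    simp only [Function.comp]
    set PR : List String := (match protected_ with
      | none => ([] : List String)
      | some p => if p.isEmpty then [] else p) with hPR
    by_cases h3 : PySem.Str.len t ≤ 3
    · have hnat : t.length ≤ 3 := by
        rw [PySem.Str.len_eq] at h3
        have hl : t.toList.length = t.length := by simp
        omega
      simp [hnat]
    · have hd : decide (PySem.Str.len t ≤ 3) = false := decide_eq_false h3
      by_cases hp : PR.contains (PySem.Str.lower t) = true
      · have hpm : PySem.Str.lower t ∈ PR := by simpa using hp
        simp [hpm]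
      · have hp' : PR.contains (PySem.Str.lower t) = false := Bool.eq_false_iff.mpr hp
        simp only [hd, hp', Bool.false_or, Bool.false_eq_true, if_false]
        rw [pvKey terms t h3]
        split_ifs with hbb
        · rw [hbb]; rfl
        · rw [Bool.eq_false_iff.mpr hbb]; rfl

-- ===== VERDICT (by name: the statement is the Claim_ definition above) =====
theorem suppress_subspans_spec : Claim_equal_suppress_subspans := by
  intro terms protected_ _
  unfold Spec_suppress_subspans
  exact suppress_subspans_eq_alt terms protected_
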